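-- pv_equiv track=rewrite | github.com/emilianomillan/Inteligencia-Artificial | Tareas/Calendario.py | buscar_dfs_diaEspecifico
-- ===== SOURCE A (Python) =====
-- class Node():
--     def __init__(self, state, parent, action):
--         self.state = state
--         self.parent = parent
--         self.action = action
--
-- class StackFrontier():
--     def __init__(self):
--         self.frontier = []
--
--     def add(self, node):
--         self.frontier.append(node)
--
--     def contains_state(self, state):
--         return any(node.state == state for node in self.frontier)
--
--     def empty(self):
--         return len(self.frontier) == 0
--
--     def remove(self):
--         if self.empty():
--             raise Exception("empty frontier")
--         node = self.frontier[-1]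
--         self.frontier = self.frontier[:-1]
--         return node
--
-- calendario = [
--     ['E', 1, 0, 1, 1, 1, 0],
--     [1, 1, 1, 1, 1, 1, 1],
--     [0, 1, 1, 1, 0, 1, 1],
--     [1, 0, 1, 1, 1, 0, 1]
-- ]
--
-- dias_semana = ["Lunes", "Martes", "Miércoles", "Jueves", "Viernes", "Sábado", "Domingo"]
--
-- def etiqueta_dia(pos):
--     fila, col = pos
--     dia = dias_semana[col]
--     semana = fila + 1
--     return f"{dia}, Semana {semana}"
--
-- def buscar_dfs_diaEspecifico(dia_inicio, dia_columna):
--     node_start = Node(state=dia_inicio, parent=None, action=None)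
--     frontier = StackFrontier()
--     frontier.add(node_start)
--     explored = set()
--
--     while not frontier.empty():
--         node = frontier.remove()
--
--         if node.state in explored:
--             continue
--
--         r, c = node.state
--
--         if calendario[r][c] == 0 and c == dia_columna:
--             return etiqueta_dia(node.state)
--
--         explored.add(node.state)
--
--         for semana_idx in range(len(calendario)):
--             neighbor = (semana_idx, dia_columna)
--             if neighbor not in explored and not frontier.contains_state(neighbor):
--                 if neighbor != node.state:
--                     child = Node(state=neighbor, parent=node, action=f"{dias_semana[dia_columna]}_semana_{semana_idx+1}")
--                     frontier.add(child)
--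
--     return f"No hay {dias_semana[dia_columna].lower()}s libres disponibles"
-- ===== SOURCE B (Python) =====
-- # B: direct reverse-order column scan replacing the Node/StackFrontier DFS machinery.
-- calendario = [
--     ['E', 1, 0, 1, 1, 1, 0],
--     [1, 1, 1, 1, 1, 1, 1],
--     [0, 1, 1, 1, 0, 1, 1],
--     [1, 0, 1, 1, 1, 0, 1]
-- ]
--
-- dias_semana = ["Lunes", "Martes", "Miércoles", "Jueves", "Viernes", "Sábado", "Domingo"]
--
-- def etiqueta_dia(pos):
--     fila, col = pos
--     dia = dias_semana[col]
--     semana = fila + 1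
--     return f"{dia}, Semana {semana}"
--
-- def buscar_dfs_diaEspecifico(dia_inicio, dia_columna):
--     r, c = dia_inicio
--     if calendario[r][c] == 0 and c == dia_columna:
--         return etiqueta_dia((r, c))
--     for semana_idx in range(len(calendario) - 1, -1, -1):
--         if (semana_idx, dia_columna) != (r, c) and calendario[semana_idx][dia_columna] == 0:
--             return etiqueta_dia((semana_idx, dia_columna))
--     return f"No hay {dias_semana[dia_columna].lower()}s libres disponibles"
-- ===== Notes on version B (the rewrite author's own statement) =====
-- stated objective: simpler
-- what changed: Replaced the Node/StackFrontier depth-first search machinery (classes, explored set, frontier duplicate checks) with a start-cell check followed by a direct reverse-order scan of the calendar column.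
import Mathlib
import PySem

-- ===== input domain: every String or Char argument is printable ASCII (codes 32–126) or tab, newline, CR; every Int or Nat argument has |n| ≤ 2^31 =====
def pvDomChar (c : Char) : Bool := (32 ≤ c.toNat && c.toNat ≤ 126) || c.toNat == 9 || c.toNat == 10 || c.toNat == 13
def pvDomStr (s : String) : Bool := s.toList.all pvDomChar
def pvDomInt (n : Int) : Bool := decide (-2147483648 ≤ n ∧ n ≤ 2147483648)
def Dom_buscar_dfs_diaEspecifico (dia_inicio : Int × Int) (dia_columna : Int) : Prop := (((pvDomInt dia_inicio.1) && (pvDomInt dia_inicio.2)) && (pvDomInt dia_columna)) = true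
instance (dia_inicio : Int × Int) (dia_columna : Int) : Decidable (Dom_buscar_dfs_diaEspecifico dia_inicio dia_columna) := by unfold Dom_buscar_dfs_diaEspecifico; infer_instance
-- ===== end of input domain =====

-- B replaces A's Node/StackFrontier depth-first search with a direct reverse-order scan of the
-- calendar column (objective: simpler). Equivalence is proved on the inputs where A returns (Pre_).

-- Module constants shared by A and B (identical in both Python files).
-- calendario: the cell 'E' is only ever compared '== 0' in Python (False, like 1); it is encoded as 2.
def pvCalendario : List (List Int) :=
  [[2, 1, 0, 1, 1, 1, 0],
   [1, 1, 1, 1, 1, 1, 1],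
   [0, 1, 1, 1, 0, 1, 1],
   [1, 0, 1, 1, 1, 0, 1]]

def pvDiasSemana : List String :=
  ["Lunes", "Martes", "Miércoles", "Jueves", "Viernes", "Sábado", "Domingo"]

-- calendario[i][j]; the defaults are reached only where Python raises IndexError (outside Pre_).
def pvCell (i j : Int) : Int :=
  PySem.List.pyGetD ((PySem.List.pyGet? pvCalendario i).getD []) j 1

-- module helper etiqueta_dia (shared by A and B); built on List Char (kernel-transparent).
def pvEtiquetaDia (pos : Int × Int) : String :=
  let dia := ((PySem.List.pyGet? pvDiasSemana pos.2).getD "").toList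
  String.ofList (dia ++ (", Semana ".toList) ++ PySem.Int.toChars (pos.1 + 1))

-- f"No hay {dias_semana[dia_columna].lower()}s libres disponibles"
def pvNoHay (dia_columna : Int) : String :=
  String.ofList (("No hay ".toList) ++
    PySem.Chars.lower ((PySem.List.pyGet? pvDiasSemana dia_columna).getD "").toList ++
    ("s libres disponibles".toList))

-- ===== PORT A =====
-- Node's parent and action fields are never read by the algorithm, so a frontier node is its state;
-- the action f-string's dias_semana[dia_columna] lookup raises only outside Pre_.
-- The while loop is given fuel; inside Pre_ at most 10 iterations ever occur (≤ 5 distinct states,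
-- each pushed once), so fuel 16 is never exhausted there.
def pvDfsLoop (dia_columna : Int) (fuel : Nat) (frontier : List (Int × Int))
    (explored : PySem.Set (Int × Int)) : String :=
  match fuel with
  | 0 => pvNoHay dia_columna     -- unreachable inside Pre_
  | fuel + 1 =>
    match frontier with
    | [] => pvNoHay dia_columna
    | _ :: _ =>
      -- node = frontier[-1]; frontier = frontier[:-1]
      let node := (PySem.List.pyGet? frontier (-1)).getD (0, 0)
      let rest := PySem.List.slice frontier none (some (-1))
      if PySem.Set.contains explored node then
        pvDfsLoop dia_columna fuel rest explored
      else
        if pvCell node.1 node.2 == 0 && node.2 == dia_columna then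
          pvEtiquetaDia node
        else
          let explored' := PySem.Set.add explored node
          let frontier' := (PySem.List.pyRange 0 4 1).foldl (fun fr s =>
            let neighbor := (s, dia_columna)
            if !(PySem.Set.contains explored' neighbor) && !(fr.contains neighbor) then
              if neighbor != node then fr ++ [neighbor] else fr
            else fr) rest
          pvDfsLoop dia_columna fuel frontier' explored'

def buscar_dfs_diaEspecifico (dia_inicio : Int × Int) (dia_columna : Int) : String :=
  pvDfsLoop dia_columna 16 [dia_inicio] PySem.Set.empty

-- ===== PORT B =====
def buscar_dfs_diaEspecifico_alt (dia_inicio : Int × Int) (dia_columna : Int) : String :=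
  let r := dia_inicio.1
  let c := dia_inicio.2
  if pvCell r c == 0 && c == dia_columna then
    pvEtiquetaDia (r, c)
  else
    match (PySem.List.pyRange 3 (-1) (-1)).findSome? (fun s =>
        if (s, dia_columna) != (r, c) && pvCell s dia_columna == 0 then
          some (pvEtiquetaDia (s, dia_columna))
        else none) with
    | some out => out
    | none => pvNoHay dia_columna

-- ===== PRECONDITION & SPEC =====
-- Pre_ excludes exactly the inputs on which Python A raises IndexError: a start row outside
-- calendario's Python index range, a start column or dia_columna outside the 7-day index range.
def Pre_buscar_dfs_diaEspecifico (dia_inicio : Int × Int) (dia_columna : Int) : Prop :=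
  -4 ≤ dia_inicio.1 ∧ dia_inicio.1 ≤ 3 ∧ -7 ≤ dia_inicio.2 ∧ dia_inicio.2 ≤ 6 ∧
  -7 ≤ dia_columna ∧ dia_columna ≤ 6

instance (dia_inicio : Int × Int) (dia_columna : Int) : Decidable (Pre_buscar_dfs_diaEspecifico dia_inicio dia_columna) := by unfold Pre_buscar_dfs_diaEspecifico; infer_instance

def pvWitness_buscar_dfs_diaEspecifico : (Int × Int) × Int := ((0, 3), 4)

def Spec_buscar_dfs_diaEspecifico (dia_inicio : Int × Int) (dia_columna : Int) (out : String) : Prop := out = buscar_dfs_diaEspecifico_alt dia_inicio dia_columna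
instance (dia_inicio : Int × Int) (dia_columna : Int) (out : String) : Decidable (Spec_buscar_dfs_diaEspecifico dia_inicio dia_columna out) := by unfold Spec_buscar_dfs_diaEspecifico; infer_instance

-- ===== CLAIM (what is proved, stated in full; the proofs are below) =====
def Claim_equal_buscar_dfs_diaEspecifico : Prop := ∀ (dia_inicio : Int × Int) (dia_columna : Int), Dom_buscar_dfs_diaEspecifico dia_inicio dia_columna → Pre_buscar_dfs_diaEspecifico dia_inicio dia_columna → Spec_buscar_dfs_diaEspecifico dia_inicio dia_columna (buscar_dfs_diaEspecifico dia_inicio dia_columna)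

-- ===== LEMMAS AND PROOFS =====

-- exhaustive check of the (finite) precondition domain
def pvCheckAll : Bool :=
  (List.range 8).all fun ri => (List.range 14).all fun ci => (List.range 14).all fun di =>
    buscar_dfs_diaEspecifico ((ri : Int) - 4, (ci : Int) - 7) ((di : Int) - 7) ==
      buscar_dfs_diaEspecifico_alt ((ri : Int) - 4, (ci : Int) - 7) ((di : Int) - 7)

set_option maxHeartbeats 4000000 in
theorem pvCheckAll_true : pvCheckAll = true := by decide

-- ===== VERDICT (by name: the statement is the Claim_ definition above) =====
theorem buscar_dfs_diaEspecifico_spec : Claim_equal_buscar_dfs_diaEspecifico := by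
  intro di dc _ hpre
  obtain ⟨h1, h2, h3, h4, h5, h6⟩ := hpre
  have hall := pvCheckAll_true
  unfold pvCheckAll at hall
  simp only [List.all_eq_true, List.mem_range, beq_iff_eq] at hall
  have := hall (di.1 + 4).toNat (by omega) (di.2 + 7).toNat (by omega) (dc + 7).toNat (by omega)
  unfold Spec_buscar_dfs_diaEspecifico
  have e1 : ((di.1 + 4).toNat : Int) - 4 = di.1 := by omega
  have e2 : ((di.2 + 7).toNat : Int) - 7 = di.2 := by omega
  have e3 : ((dc + 7).toNat : Int) - 7 = dc := by omega
  rw [e1, e2, e3] at this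
  simpa using this
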